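-- pv_equiv track=rewrite | github.com/AricayaJohn/playground | TDSA/95exhaustiveRecursion.py | parenthetical_possibilities
-- ===== SOURCE A (Python) =====
-- def parenthetical_possibilities(s):
--   if len(s) == 0:
--     return ['']  # Base case: return empty string when s is empty
--
--   remaining, chars = get_options(s)  # Parse the next character or set of choices
--   suffixes = parenthetical_possibilities(remaining)  # Recurse on the rest of the string
--
--   possibilities = []
--   for char in chars:  # Loop through the current character(s) to combine with suffixes
--     possibilities += [ char + suffix for suffix in suffixes ]
--
--   return possibilities
--
-- def get_options(s):
--   if s[0] == '(':
--     idx = s.index(')')               # Find the closing parenthesis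
--     chars = s[1:idx]                 # Extract the characters inside the parentheses
--     remaining = s[idx + 1:]         # Get the rest of the string after the ')'
--     return ( remaining, chars )
--   else:
--     chars = s[0]                     # Take the current character as is
--     remaining = s[1:]               # Continue with the rest of the string
--     return ( remaining, chars )
-- ===== SOURCE B (Python) =====
-- def parenthetical_possibilities(s):
--     # Scan once into option groups, then fold: each group's options are
--     # appended to every prefix built so far (first group varies slowest).
--     groups = []
--     i = 0
--     while i < len(s):
--         if s[i] == '(':
--             j = s.index(')', i)          # ValueError if unmatched, like A
--             groups.append(s[i + 1:j])
--             i = j + 1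
--         else:
--             groups.append(s[i])
--             i += 1
--     results = ['']
--     for group in groups:
--         results = [prefix + option for prefix in results for option in group]
--     return results
-- ===== Notes on version B (the rewrite author's own statement) =====
-- stated objective: faster
-- what changed: A recursively parses one option group per call and prepends its characters to the recursively built suffixes (deep recursion, repeated list += concatenations); B scans the string once into a flat list of option groups and then builds the results iteratively with a single left fold that extends every prefix by every option of the next group.
import Mathlib
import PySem

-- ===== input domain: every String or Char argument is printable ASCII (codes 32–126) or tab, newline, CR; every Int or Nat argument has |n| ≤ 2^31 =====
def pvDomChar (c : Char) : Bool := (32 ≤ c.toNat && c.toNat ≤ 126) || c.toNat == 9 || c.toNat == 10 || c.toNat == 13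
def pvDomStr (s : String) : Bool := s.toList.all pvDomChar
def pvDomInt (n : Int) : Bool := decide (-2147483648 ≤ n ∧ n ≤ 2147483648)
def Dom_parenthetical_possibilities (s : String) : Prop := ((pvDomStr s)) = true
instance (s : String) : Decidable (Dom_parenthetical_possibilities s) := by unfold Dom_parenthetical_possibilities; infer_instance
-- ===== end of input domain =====

-- B replaces A's per-step recursion (parse one group, recurse, prepend) by a single
-- scan into option groups followed by a left fold extending all prefixes (alternative decomposition).

-- ===== PORT A =====
-- A's recursion over the string; ported on List Char (strings rebuilt at the top).
-- The '(' branch without a ')' is Python's ValueError (s.index raises): excluded by Pre_.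
def parenAux : List Char → List (List Char)
  | [] => [[]]
  | c :: rest =>
    if c = '(' then
      if h : ')' ∈ rest then
        let j := rest.idxOf ')'
        let chars := rest.take j
        let remaining := rest.drop (j + 1)
        let suffixes := parenAux remaining
        chars.flatMap (fun ch => suffixes.map (fun suf => ch :: suf))
      else []   -- ValueError in Python; outside Pre_
    else
      let suffixes := parenAux rest
      [c].flatMap (fun ch => suffixes.map (fun suf => ch :: suf))
  termination_by l => l.length
  decreasing_by
    all_goals simp [List.length_drop]

def parenthetical_possibilities (s : String) : List String :=
  (parenAux s.toList).map String.ofList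

-- ===== PORT B =====
-- B's single scan into groups (the raise case yields no further groups; outside Pre_).
def scanGroups : List Char → List (List Char)
  | [] => []
  | c :: rest =>
    if c = '(' then
      if h : ')' ∈ rest then
        let j := rest.idxOf ')'
        rest.take j :: scanGroups (rest.drop (j + 1))
      else []   -- ValueError in Python; outside Pre_
    else
      [c] :: scanGroups rest
  termination_by l => l.length
  decreasing_by
    all_goals simp [List.length_drop]

-- B's fold: extend every prefix by every option of the next group.
def combineGroups (groups : List (List Char)) : List (List Char) :=
  groups.foldl (fun acc g => acc.flatMap (fun p => g.map (fun c => p ++ [c]))) [[]]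

def parenthetical_possibilities_alt (s : String) : List String :=
  (combineGroups (scanGroups s.toList)).map String.ofList

-- ===== PRECONDITION & SPEC =====
-- Pre_ excludes exactly the inputs where Python A raises ValueError: a '(' with no ')' anywhere
-- after it (B raises ValueError on exactly the same inputs).
def PreChars (l : List Char) : Prop :=
  ∀ i, i < l.length → (l.drop i).head? = some '(' → ')' ∈ (l.drop i).tail

def Pre_parenthetical_possibilities (s : String) : Prop := PreChars s.toList
instance (s : String) : Decidable (Pre_parenthetical_possibilities s) := by
  unfold Pre_parenthetical_possibilities PreChars; infer_instance

def pvWitness_parenthetical_possibilities : String := "(ab)c(de)"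

def Spec_parenthetical_possibilities (s : String) (out : List String) : Prop := out = parenthetical_possibilities_alt s
instance (s : String) (out : List String) : Decidable (Spec_parenthetical_possibilities s out) := by unfold Spec_parenthetical_possibilities; infer_instance

-- ===== CLAIM (what is proved, stated in full; the proofs are below) =====
def Claim_equal_parenthetical_possibilities : Prop := ∀ (s : String), Dom_parenthetical_possibilities s → Pre_parenthetical_possibilities s → Spec_parenthetical_possibilities s (parenthetical_possibilities s)

-- ===== LEMMAS AND PROOFS =====

-- right-to-left product view of the groups (A's structure)
def prodR (groups : List (List Char)) : List (List Char) :=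
  groups.foldr (fun g acc => g.flatMap (fun c => acc.map (fun t => c :: t))) [[]]

lemma preChars_drop {l : List Char} (h : PreChars l) (k : Nat) : PreChars (l.drop k) := by
  intro i hi hh
  have hlen : k + i < l.length := by
    simp [List.length_drop] at hi; omega
  have e : (l.drop k).drop i = l.drop (k + i) := by
    rw [List.drop_drop, Nat.add_comm]
  rw [e] at hh ⊢
  exact h (k + i) hlen hh

lemma preChars_cons_mem {c : Char} {rest : List Char}
    (h : PreChars (c :: rest)) (hc : c = '(') : ')' ∈ rest := by
  have := h 0 (by simp) (by simp [hc])
  simpa using this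

lemma parenAux_eq_prodR_scan : ∀ n (l : List Char), l.length ≤ n → PreChars l →
    parenAux l = prodR (scanGroups l) := by
  intro n
  induction n with
  | zero =>
    intro l hl _
    have : l = [] := List.eq_nil_of_length_eq_zero (by omega)
    subst this
    simp [parenAux.eq_def, scanGroups.eq_def, prodR]
  | succ n ih =>
    intro l hl hpre
    match l with
    | [] => simp [parenAux.eq_def, scanGroups.eq_def, prodR]
    | c :: rest =>
      by_cases hc : c = '('
      · have hmem : ')' ∈ rest := preChars_cons_mem hpre hc
        have hrem : PreChars (rest.drop (rest.idxOf ')' + 1)) := by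
          have := preChars_drop hpre (rest.idxOf ')' + 2)
          simpa [List.drop_drop, Nat.add_comm, Nat.add_left_comm] using this
        have hlen : (rest.drop (rest.idxOf ')' + 1)).length ≤ n := by
          simp at hl
          simp [List.length_drop]; omega
        rw [parenAux.eq_def, scanGroups.eq_def]
        simp only [hc, if_pos, dif_pos hmem, prodR, List.foldr_cons]
        rw [ih _ hlen hrem]
        rfl
      · have hrest : PreChars rest := by
          have := preChars_drop hpre 1; simpa using this
        have hlen : rest.length ≤ n := by simp at hl; omega
        rw [parenAux.eq_def, scanGroups.eq_def]
        simp only [if_neg hc, prodR, List.foldr_cons]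
        rw [ih _ hlen hrest]
        rfl

lemma foldl_step_eq (gs : List (List Char)) : ∀ acc : List (List Char),
    gs.foldl (fun acc g => acc.flatMap (fun p => g.map (fun c => p ++ [c]))) acc
      = acc.flatMap (fun p => (prodR gs).map (fun t => p ++ t)) := by
  induction gs with
  | nil =>
    intro acc
    simp [prodR]
  | cons g gs ih =>
    intro acc
    rw [List.foldl_cons, ih]
    simp only [prodR, List.foldr_cons]
    rw [List.flatMap_assoc]
    congr 1
    funext p
    rw [List.map_flatMap, List.flatMap_map]
    congr 1
    funext c
    simp

lemma combineGroups_eq_prodR (gs : List (List Char)) : combineGroups gs = prodR gs := by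
  unfold combineGroups
  rw [foldl_step_eq]
  simp

-- ===== VERDICT (by name: the statement is the Claim_ definition above) =====
theorem parenthetical_possibilities_spec : Claim_equal_parenthetical_possibilities := by
  intro s _ hpre
  unfold Spec_parenthetical_possibilities parenthetical_possibilities parenthetical_possibilities_alt
  rw [combineGroups_eq_prodR, parenAux_eq_prodR_scan s.toList.length s.toList le_rfl hpre]
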